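-- pv_equiv track=rewrite | github.com/jasperdevs/lessmark | packages/python/src/lessmark/core.py | _contains_raw_expression
-- ===== SOURCE A (Python) =====
-- def _contains_raw_expression(text: str) -> bool:
--     source = str(text)
--     for index, current in enumerate(source):
--         previous = source[index - 1] if index > 0 else ""
--         next_char = source[index + 1] if index + 1 < len(source) else ""
--         if current == "$" and next_char == "{":
--             return True
--         if current == "{" and previous != "{" and next_char != "{":
--             return True
--         if current == "}" and previous != "}" and next_char != "}":
--             return True
--     return False
-- ===== SOURCE B (Python) =====
-- def _contains_raw_expression(text: str) -> bool:
--     # Run-length scan: walk maximal runs of equal characters instead of checking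
--     # per-position neighbors. A lone "{" or "}" is exactly a brace run of length 1,
--     # and "${" is a "$" run immediately followed by "{".
--     chars = str(text)
--     i, n = 0, len(chars)
--     while i < n:
--         head = chars[i]
--         j = i + 1
--         while j < n and chars[j] == head:
--             j += 1
--         if head == "$" and j < n and chars[j] == "{":
--             return True
--         if head in "{}" and j - i == 1:
--             return True
--         i = j
--     return False
-- ===== Notes on version B (the rewrite author's own statement) =====
-- stated objective: alternative
-- what changed: B replaces A's per-position scan with two neighbor lookups at every index by a run-length scan that jumps over maximal runs of equal characters: a lone brace is exactly a brace run of length 1, and the dollar-brace marker is a dollar run immediately followed by an opening brace.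
import Mathlib
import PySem

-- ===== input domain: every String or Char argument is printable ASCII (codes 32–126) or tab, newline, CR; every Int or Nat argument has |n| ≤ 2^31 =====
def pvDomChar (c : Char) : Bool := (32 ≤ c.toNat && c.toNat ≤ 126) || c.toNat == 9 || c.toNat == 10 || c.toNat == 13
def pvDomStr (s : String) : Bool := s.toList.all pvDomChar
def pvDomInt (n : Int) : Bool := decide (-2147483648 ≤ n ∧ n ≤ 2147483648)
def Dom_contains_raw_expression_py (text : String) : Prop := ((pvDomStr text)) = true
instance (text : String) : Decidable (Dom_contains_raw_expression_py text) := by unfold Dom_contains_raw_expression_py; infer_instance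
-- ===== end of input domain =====

-- B replaces A's per-position neighbor scan by a run-length scan over maximal runs of equal characters (alternative decomposition, same cost).

-- ===== PORT A =====
-- the for-loop over enumerate(source); previous/next_char are "" or a 1-char string in Python,
-- ported as Option Char with none = "" (comparisons with "{" / "}" become comparisons with some '{', some '}');
-- both indexings are guarded in range, so pyGet? is exact
def pvAGo (source : List Char) : List (Int × Char) → Bool
  | [] => false
  | (index, current) :: restEnum =>
    let previous : Option Char :=
      if index > 0 then PySem.List.pyGet? source (index - 1) else none
    let next_char : Option Char :=
      if index + 1 < PySem.List.len source then PySem.List.pyGet? source (index + 1) else none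
    if current = '$' ∧ next_char = some '{' then true
    else if current = '{' ∧ previous ≠ some '{' ∧ next_char ≠ some '{' then true
    else if current = '}' ∧ previous ≠ some '}' ∧ next_char ≠ some '}' then true
    else pvAGo source restEnum

def contains_raw_expression_py (text : String) : Bool :=
  let source := text.toList   -- source = str(text): identity on a str argument
  pvAGo source (PySem.List.enumerate source)

-- ===== PORT B =====
-- inner `while j < n and chars[j] == head`: advances j through the run of `head`
-- (pvBInner_le is cited by pvBOuter's decreasing_by)
def pvBInner (chars : List Char) (n : Nat) (head : Char) (j : Nat) : Nat :=
  if j < n ∧ chars[j]? = some head then pvBInner chars n head (j + 1) else j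
termination_by n - j
decreasing_by omega

theorem pvBInner_le (chars : List Char) (n : Nat) (head : Char) (j : Nat) :
    j ≤ pvBInner chars n head j := by
  rw [pvBInner.eq_def]
  split
  · have := pvBInner_le chars n head (j + 1)
    omega
  · omega
termination_by n - j
decreasing_by
  rename_i h
  omega

-- outer `while i < n:` of Source B; head = chars[i] is guarded by i < n, so the none branch is unreachable
def pvBOuter (chars : List Char) (n : Nat) (i : Nat) : Bool :=
  if hi : i < n then
    match chars[i]? with
    | none => false   -- unreachable: i < n = chars.length
    | some head =>
      let j := pvBInner chars n head (i + 1)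
      if head = '$' ∧ j < n ∧ chars[j]? = some '{' then true
      else if (head = '{' ∨ head = '}') ∧ j - i = 1 then true
      else pvBOuter chars n j
  else false
termination_by n - i
decreasing_by
  have := pvBInner_le chars n head (i + 1)
  omega

def contains_raw_expression_py_alt (text : String) : Bool :=
  pvBOuter text.toList text.toList.length 0   -- chars = str(text); i, n = 0, len(chars)

-- ===== PRECONDITION & SPEC =====
def Spec_contains_raw_expression_py (text : String) (out : Bool) : Prop := out = contains_raw_expression_py_alt text
instance (text : String) (out : Bool) : Decidable (Spec_contains_raw_expression_py text out) := by unfold Spec_contains_raw_expression_py; infer_instance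

-- ===== CLAIM (what is proved, stated in full; the proofs are below) =====
def Claim_equal_contains_raw_expression_py : Prop := ∀ (text : String), Dom_contains_raw_expression_py text → Spec_contains_raw_expression_py text (contains_raw_expression_py text)

-- ===== LEMMAS AND PROOFS =====

-- Source B's run scan re-expressed structurally on lists (proof-side bridge to pvBOuter)
def pvRunLen (c : Char) : List Char → Nat
  | [] => 0
  | x :: xs => if x = c then pvRunLen c xs + 1 else 0

def pvBLoop : List Char → Bool
  | [] => false
  | head :: tl =>
    if head = '$' ∧ (tl.drop (pvRunLen head tl)).head? = some '{' then true
    else if (head = '{' ∨ head = '}') ∧ 1 + pvRunLen head tl = 1 then true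
    else pvBLoop (tl.drop (pvRunLen head tl))
termination_by l => l.length
decreasing_by simp


-- A's loop, re-expressed structurally: carry the previous character instead of indexing
def pvTri (p : Option Char) : List Char → Bool
  | [] => false
  | c :: rest =>
    (if c = '$' ∧ rest.head? = some '{' then true
     else if c = '{' ∧ p ≠ some '{' ∧ rest.head? ≠ some '{' then true
     else if c = '}' ∧ p ≠ some '}' ∧ rest.head? ≠ some '}' then true
     else false) || pvTri (some c) rest

-- B's loop generalized by a pending previous character: the leading run of p's character is skipped,
-- and a pending '$' triggers if what follows its run starts with '{'
def pvBAux : Option Char → List Char → Bool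
  | none, l => pvBLoop l
  | some d, l =>
    (decide (d = '$' ∧ (l.drop (pvRunLen d l)).head? = some '{')) || pvBLoop (l.drop (pvRunLen d l))

theorem pvRunLen_eq_zero (c : Char) (l : List Char) : pvRunLen c l = 0 ↔ l.head? ≠ some c := by
  cases l with
  | nil => simp [pvRunLen]
  | cons x xs => by_cases h : x = c <;> simp [pvRunLen, h]

-- pvBAux (some c) telescopes through a leading c
theorem pvBAux_cons_self (c : Char) (rest : List Char) :
    pvBAux (some c) (c :: rest) = pvBAux (some c) rest := by
  simp [pvBAux, pvRunLen]

theorem pvBLoop_cons (c : Char) (tl : List Char) :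
    pvBLoop (c :: tl) =
      (decide (c = '$' ∧ (tl.drop (pvRunLen c tl)).head? = some '{') ||
       (decide ((c = '{' ∨ c = '}') ∧ 1 + pvRunLen c tl = 1) ||
       pvBLoop (tl.drop (pvRunLen c tl)))) := by
  rw [pvBLoop.eq_def]
  by_cases h1 : c = '$' ∧ (tl.drop (pvRunLen c tl)).head? = some '{' <;>
    by_cases h2 : (c = '{' ∨ c = '}') ∧ 1 + pvRunLen c tl = 1 <;>
      simp [h1, h2]

theorem pvBInner_eq (chars : List Char) (head : Char) (j : Nat) :
    pvBInner chars chars.length head j = j + pvRunLen head (chars.drop j) := by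
  rw [pvBInner.eq_def]
  by_cases h : j < chars.length ∧ chars[j]? = some head
  · rw [if_pos h]
    obtain ⟨hj, hc⟩ := h
    have hdrop : chars.drop j = chars[j] :: chars.drop (j + 1) := List.drop_eq_getElem_cons hj
    have hc' : chars[j] = head := by
      have := List.getElem?_eq_getElem hj
      rw [this] at hc; injection hc
    rw [pvBInner_eq chars head (j + 1), hdrop, hc', pvRunLen]
    simp
    omega
  · rw [if_neg h]
    rcases Nat.lt_or_ge j chars.length with hj | hj
    · have hc : chars[j]? ≠ some head := fun hh => h ⟨hj, hh⟩
      have hdrop : chars.drop j = chars[j] :: chars.drop (j + 1) := List.drop_eq_getElem_cons hj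
      have : chars[j] ≠ head := fun hh => hc (by rw [List.getElem?_eq_getElem hj, hh])
      rw [hdrop, pvRunLen, if_neg this]
      omega
    · rw [List.drop_eq_nil_of_le hj]
      simp [pvRunLen]
termination_by chars.length - j
decreasing_by omega

theorem pvBOuter_eq (chars : List Char) (i : Nat) :
    pvBOuter chars chars.length i = pvBLoop (chars.drop i) := by
  rw [pvBOuter.eq_def]
  by_cases hi : i < chars.length
  · rw [dif_pos hi]
    have hdrop : chars.drop i = chars[i] :: chars.drop (i + 1) := List.drop_eq_getElem_cons hi
    rw [List.getElem?_eq_getElem hi]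
    set head := chars[i] with hhead
    set tl := chars.drop (i + 1) with htl
    have hj : pvBInner chars chars.length head (i + 1) = (i + 1) + pvRunLen head tl :=
      pvBInner_eq chars head (i + 1)
    have hdj : chars.drop ((i + 1) + pvRunLen head tl) = tl.drop (pvRunLen head tl) := by
      rw [htl, List.drop_drop]
    have hhd : (tl.drop (pvRunLen head tl)).head? = chars[(i + 1) + pvRunLen head tl]? := by
      rw [← hdj, List.head?_drop]
    rw [hdrop, pvBLoop.eq_def]
    simp only [hj, hhd]
    have hc1 : (head = '$' ∧ (i + 1) + pvRunLen head tl < chars.length ∧ chars[(i + 1) + pvRunLen head tl]? = some '{')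
        ↔ (head = '$' ∧ chars[(i + 1) + pvRunLen head tl]? = some '{') := by
      constructor
      · rintro ⟨a, _, b⟩; exact ⟨a, b⟩
      · rintro ⟨a, b⟩
        refine ⟨a, ?_, b⟩
        by_contra hlt
        rw [List.getElem?_eq_none (by omega)] at b
        simp at b
    have hc2 : ((head = '{' ∨ head = '}') ∧ (i + 1) + pvRunLen head tl - i = 1)
        ↔ ((head = '{' ∨ head = '}') ∧ 1 + pvRunLen head tl = 1) := by
      constructor <;> rintro ⟨a, b⟩ <;> exact ⟨a, by omega⟩
    by_cases h1 : head = '$' ∧ chars[(i + 1) + pvRunLen head tl]? = some '{'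
    · rw [if_pos (hc1.mpr h1), if_pos h1]
    · rw [if_neg (fun hh => h1 (hc1.mp hh)), if_neg h1]
      by_cases h2 : (head = '{' ∨ head = '}') ∧ 1 + pvRunLen head tl = 1
      · rw [if_pos (hc2.mpr h2), if_pos h2]
      · rw [if_neg (fun hh => h2 (hc2.mp hh)), if_neg h2]
        rw [pvBOuter_eq chars ((i + 1) + pvRunLen head tl), hdj]
  · rw [dif_neg hi]
    rw [List.drop_eq_nil_of_le (by omega)]
    rw [pvBLoop]
termination_by chars.length - i
decreasing_by omega

theorem pvAGo_eq_pvTri : ∀ (suf pre : List Char),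
    pvAGo (pre ++ suf) (PySem.List.enumerate suf (pre.length : Int)) = pvTri pre.getLast? suf := by
  intro suf
  induction suf with
  | nil => intro pre; simp [PySem.List.enumerate, pvAGo, pvTri]
  | cons c rest ih =>
    intro pre
    rw [PySem.List.enumerate_cons]
    have hprev : (if ((pre.length : Int) > 0) then PySem.List.pyGet? (pre ++ c :: rest) ((pre.length : Int) - 1) else none) = pre.getLast? := by
      rcases List.eq_nil_or_concat pre with h | ⟨ys, a, h⟩
      · simp [h]
      · have hne : pre ≠ [] := by simp [h]
        have hpos : 0 < pre.length := List.length_pos_of_ne_nil hne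
        rw [if_pos (by exact_mod_cast hpos)]
        have : ((pre.length : Int) - 1) = ((pre.length - 1 : Nat) : Int) := by omega
        rw [this, PySem.List.pyGet?_natCast,
            List.getElem?_append_left (by omega), List.getLast?_eq_getElem?]
    have hnext : (if ((pre.length : Int) + 1 < PySem.List.len (pre ++ c :: rest)) then PySem.List.pyGet? (pre ++ c :: rest) ((pre.length : Int) + 1) else none) = rest.head? := by
      have hlen : PySem.List.len (pre ++ c :: rest) = ((pre.length + 1 + rest.length : Nat) : Int) := by
        simp [PySem.List.len_eq]; ring
      rw [hlen]
      by_cases hr : rest = []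
      · subst hr; rw [if_neg (by simp)]; rfl
      · have : 0 < rest.length := List.length_pos_of_ne_nil hr
        rw [if_pos (by simp; omega)]
        have h1 : ((pre.length : Int) + 1) = ((pre.length + 1 : Nat) : Int) := by push_cast; ring
        rw [h1, PySem.List.pyGet?_natCast, List.getElem?_append_right (by omega),
            List.head?_eq_getElem?]
        rw [show pre.length + 1 - pre.length = 1 from by omega]
        simp
    have hrec : pvAGo (pre ++ c :: rest) (PySem.List.enumerate rest ((pre.length : Int) + 1)) = pvTri (some c) rest := by
      have := ih (pre ++ [c])
      simpa using this
    show pvAGo (pre ++ c :: rest) (((pre.length : Int), c) :: PySem.List.enumerate rest ((pre.length : Int) + 1)) = _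
    rw [pvAGo]
    simp only [hprev, hnext, hrec, pvTri]
    by_cases h1 : c = '$' ∧ rest.head? = some '{' <;>
      by_cases h2 : c = '{' ∧ pre.getLast? ≠ some '{' ∧ rest.head? ≠ some '{' <;>
        by_cases h3 : c = '}' ∧ pre.getLast? ≠ some '}' ∧ rest.head? ≠ some '}' <;>
          simp [h1, h2, h3]

theorem pvTri_eq_pvBAux : ∀ (l : List Char) (p : Option Char),
    (p = some '$' → l.head? ≠ some '{') → pvTri p l = pvBAux p l := by
  intro l
  induction l with
  | nil => intro p _; cases p <;> simp [pvTri, pvBAux, pvBLoop, pvRunLen]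
  | cons c rest ih =>
    intro p hp
    by_cases hdol : c = '$' ∧ rest.head? = some '{'
    · -- the '$'-then-'{' trigger: both sides are true
      obtain ⟨hc, hh⟩ := hdol
      subst hc
      have hk : pvRunLen '$' rest = 0 := by rw [pvRunLen_eq_zero]; simp [hh]
      have hT : pvTri p ('$' :: rest) = true := by simp [pvTri, hh]
      rw [hT]
      cases p with
      | none => simp [pvBAux, pvBLoop_cons, hk, hh]
      | some d =>
        by_cases hd : d = '$'
        · subst hd
          simp [pvBAux, pvRunLen, hk, hh]
        · have hk2 : pvRunLen d ('$' :: rest) = 0 := by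
            rw [pvRunLen_eq_zero]; simp; exact fun h => hd h.symm
          simp [pvBAux, hk2, pvBLoop_cons, hk, hh]
    · -- no '$'-trigger at this position; IH applies to (rest, some c)
      have ih' := ih (some c) (by
        intro h hr
        injection h with h
        subst h
        exact hdol ⟨rfl, hr⟩)
      by_cases hpc : p = some c
      · -- previous char equals c: brace clauses are off, and bAux telescopes
        subst hpc
        rw [pvBAux_cons_self, ← ih']
        simp only [pvTri]
        simp [hdol]
        rintro (⟨h, h', _⟩ | ⟨h, h', _⟩) <;> exact absurd h h'
      · -- previous char differs: lone-brace test = run of length 1; unfold one step of bLoop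
        have hbx : pvBAux p (c :: rest) = pvBLoop (c :: rest) := by
          cases p with
          | none => rfl
          | some d =>
            have hdc : d ≠ c := fun h => hpc (by rw [h])
            have hk : pvRunLen d (c :: rest) = 0 := by simp [pvRunLen, Ne.symm hdc]
            have hnot : ¬ (d = '$' ∧ c = '{') := by
              rintro ⟨h1, h2⟩; exact hp (by rw [h1]) (by simp [h2])
            simp [pvBAux, hk]
            intro h1 h2
            exact absurd ⟨h1, by simpa using h2⟩ hnot
        rw [hbx]
        simp only [pvTri]
        rw [ih']
        simp only [pvBAux]
        rw [pvBLoop_cons]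
        have hb1 : c = '{' → p ≠ some '{' := fun h hq => hpc (by rw [hq, h])
        have hb2 : c = '}' → p ≠ some '}' := fun h hq => hpc (by rw [hq, h])
        by_cases hB : c = '{' ∧ p ≠ some '{' ∧ rest.head? ≠ some '{'
        · -- lone '{': both sides true via the run-of-length-1 clause
          obtain ⟨h1, _, h3⟩ := hB
          subst h1
          have hk : pvRunLen '{' rest = 0 := by rw [pvRunLen_eq_zero]; exact h3
          simp [hk, h3, hpc]
        · by_cases hC : c = '}' ∧ p ≠ some '}' ∧ rest.head? ≠ some '}'
          · obtain ⟨h1, _, h3⟩ := hC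
            subst h1
            have hk : pvRunLen '}' rest = 0 := by rw [pvRunLen_eq_zero]; exact h3
            simp [hk, h3, hpc]
          · -- no trigger here: the run-of-length-1 clause is false too
            have hne0 : ((decide (c = '{') || decide (c = '}')) && decide (pvRunLen c rest = 0)) = false := by
              by_cases hbr1 : c = '{'
              · have hh : rest.head? = some '{' := by
                  by_contra hcon
                  exact hB ⟨hbr1, hb1 hbr1, hcon⟩
                have hz : pvRunLen c rest ≠ 0 :=
                  fun hk0 => ((pvRunLen_eq_zero c rest).mp hk0) (by rw [hbr1]; exact hh)
                simp [hz]
              · by_cases hbr2 : c = '}'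
                · have hh : rest.head? = some '}' := by
                    by_contra hcon
                    exact hC ⟨hbr2, hb2 hbr2, hcon⟩
                  have hz : pvRunLen c rest ≠ 0 :=
                    fun hk0 => ((pvRunLen_eq_zero c rest).mp hk0) (by rw [hbr2]; exact hh)
                  simp [hz]
                · simp [hbr1, hbr2]
            simp [hdol, hB, hC, hne0]

-- ===== VERDICT (by name: the statement is the Claim_ definition above) =====
theorem contains_raw_expression_py_spec : Claim_equal_contains_raw_expression_py := by
  intro text _
  unfold Spec_contains_raw_expression_py contains_raw_expression_py contains_raw_expression_py_alt
  have h1 := pvAGo_eq_pvTri text.toList []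
  have h2 := pvTri_eq_pvBAux text.toList none (by simp)
  have h3 := pvBOuter_eq text.toList 0
  rw [List.drop_zero] at h3
  simp at h1
  rw [h1, h2, h3]
  rfl
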